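-- pv_equiv track=rewrite | github.com/clusterpy/clusterpy | clusterpy/core/data/dissolvedata.py | rangeRegion
-- ===== SOURCE A (Python) =====
-- def minimum(alist, number):
--     """
--     This function returns the minimum of the values in a specified index (number)
--     in each sublist.
--
--     :param alist: Data list
--     :type alist: list
--     :param number: The index that represents what element of each sublist should be taken into account when getting the minimum
--     :type number: integer
--     :rtype: list (Minimum of values of each region).
--     """
--     i = 0
--     j = 0
--     results = []
--     temp = []
--     for i in range(len(alist)):
--         j = 0
--         temp = []
--         for j in range(len(alist[i][number])):
--             temp.append(alist[i][number][j])
--         results.append(min(temp))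
--     return results
--
-- def maximum(alist, number):
--     """
--     This function returns the maximum of the values in a specified index (number)
--     in each sublist.
--
--     :param alist: Data list
--     :type alist: list
--     :param number: The index that represents what element of each sublist should be taken into account when getting the maximum
--     :type number: int
--     :rtype: list (Median of values of each region)
--     """
--     i = 0
--     j = 0
--     results = []
--     temp = []
--     for i in range(len(alist)):
--         j = 0
--         temp = []
--         for j in range(len(alist[i][number])):
--             temp.append(alist[i][number][j])
--         results.append(max(temp))
--     return results
--
-- def rangeRegion(alist, number):
--     """
--     This function calculates the difference between the maximum and
--     minimum values of a variable for each region.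
--
--     :param alist: Data list
--     :type alist: list
--     :param number: The index that represents what element of each sublist should be taken into account when calculating the range.
--     :type number: int
--     :rtype: list (Maximum difference between values of each region)
--     """
--     i = 0
--     maximum1 = []
--     minimum1= []
--     range1 = 0
--     maximum1 = maximum(alist, number)
--     minimum1 = minimum(alist, number)
--     results = []
--     for i in range(0, len(maximum1)):
--         range1 = maximum1[i] - minimum1[i]
--         results.append(range1)
--     return results
-- ===== SOURCE B (Python) =====
-- def rangeRegion(alist, number):
--     results = []
--     for region in alist:
--         vals = region[number]
--         if not vals:
--             raise ValueError("empty value list for region")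
--         lo = hi = vals[0]
--         for v in vals[1:]:
--             if v < lo:
--                 lo = v
--             if v > hi:
--                 hi = v
--         results.append(hi - lo)
--     return results
-- ===== Notes on version B (the rewrite author's own statement) =====
-- stated objective: faster
-- what changed: B replaces A's three separate loops (a maximum pass, a minimum pass, each copying the value list element by element, then a subtraction pass over the two result lists) by one loop over regions that computes lo and hi in a single combined scan of each region's value list.
import Mathlib
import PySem

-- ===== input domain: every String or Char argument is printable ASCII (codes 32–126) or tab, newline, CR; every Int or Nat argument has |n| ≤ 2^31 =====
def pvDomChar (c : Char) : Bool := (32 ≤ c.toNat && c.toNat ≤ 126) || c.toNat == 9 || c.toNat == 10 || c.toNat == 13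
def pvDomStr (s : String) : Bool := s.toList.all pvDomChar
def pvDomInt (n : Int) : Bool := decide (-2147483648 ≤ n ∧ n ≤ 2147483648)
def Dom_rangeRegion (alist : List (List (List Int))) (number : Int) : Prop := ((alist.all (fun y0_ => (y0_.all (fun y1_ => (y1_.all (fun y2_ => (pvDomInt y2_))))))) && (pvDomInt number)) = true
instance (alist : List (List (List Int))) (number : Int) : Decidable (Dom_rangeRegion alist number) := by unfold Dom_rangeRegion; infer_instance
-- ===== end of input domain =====

-- B does the same max-minus-min-per-region job with one combined lo/hi scan per region
-- instead of A's separate maximum and minimum passes (with list copies) plus a subtraction pass.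
-- ===== PORT A =====
-- inner loop of minimum/maximum: temp = []; for j in range(len(vals)): temp.append(vals[j])
def pvTemp (region : List (List Int)) (number : Int) : List Int :=
  let vals := (PySem.List.pyGet? region number).getD []
  (List.range vals.length).foldl (fun temp j => temp ++ [vals.getD j 0]) []

def pvMinimum (alist : List (List (List Int))) (number : Int) : List Int :=
  alist.foldl (fun results region =>
    results ++ [(PySem.List.min? (pvTemp region number) (fun x => x)).getD 0]) []

def pvMaximum (alist : List (List (List Int))) (number : Int) : List Int :=
  alist.foldl (fun results region =>
    results ++ [(PySem.List.max? (pvTemp region number) (fun x => x)).getD 0]) []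

def rangeRegion (alist : List (List (List Int))) (number : Int) : List Int :=
  let maximum1 := pvMaximum alist number
  let minimum1 := pvMinimum alist number
  (List.range maximum1.length).foldl
    (fun results i => results ++ [maximum1.getD i 0 - minimum1.getD i 0]) []

-- ===== PORT B =====
-- single combined scan: running (lo, hi) over the tail of the value list
def pvScan (lohi : Int × Int) (rest : List Int) : Int × Int :=
  rest.foldl (fun p v => (if v < p.1 then v else p.1, if v > p.2 then v else p.2)) lohi

def rangeRegion_alt (alist : List (List (List Int))) (number : Int) : List Int :=
  alist.map (fun region =>
    match (PySem.List.pyGet? region number).getD [] with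
    | [] => 0  -- unreachable under Pre_rangeRegion: Python B raises ValueError here
    | v :: rest => let p := pvScan (v, v) rest; p.2 - p.1)

-- ===== PRECONDITION & SPEC =====
-- Pre_ excludes exactly the inputs where A raises: number out of range for some region
-- (IndexError) or some region's value list empty (min()/max() of an empty list, ValueError).
def Pre_rangeRegion (alist : List (List (List Int))) (number : Int) : Prop :=
  ∀ region ∈ alist, PySem.Raise.InRange region.length number ∧
    (PySem.List.pyGet? region number).getD [] ≠ []
instance (alist : List (List (List Int))) (number : Int) : Decidable (Pre_rangeRegion alist number) := by unfold Pre_rangeRegion; infer_instance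

def pvWitness_rangeRegion : List (List (List Int)) × Int := ([[[1, 2, 3]], [[5]], [[-4, 10, 0]]], 0)

def Spec_rangeRegion (alist : List (List (List Int))) (number : Int) (out : List Int) : Prop := out = rangeRegion_alt alist number
instance (alist : List (List (List Int))) (number : Int) (out : List Int) : Decidable (Spec_rangeRegion alist number out) := by unfold Spec_rangeRegion; infer_instance

-- ===== CLAIM (what is proved, stated in full; the proofs are below) =====
def Claim_equal_rangeRegion : Prop := ∀ (alist : List (List (List Int))) (number : Int), Dom_rangeRegion alist number → Pre_rangeRegion alist number → Spec_rangeRegion alist number (rangeRegion alist number)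

-- ===== LEMMAS AND PROOFS =====

theorem foldl_app_map {α β : Type} (f : α → β) :
    ∀ (l : List α) (acc : List β),
      l.foldl (fun r x => r ++ [f x]) acc = acc ++ l.map f := by
  intro l
  induction l with
  | nil => simp
  | cons x t ih => intro acc; simp [List.foldl, ih]

theorem range_getD_map (l : List Int) :
    (List.range l.length).map (fun i => l.getD i 0) = l := by
  apply List.ext_getElem
  · simp
  · intro i h1 h2
    simp [List.getElem?_eq_getElem h2]

theorem pvTemp_eq (region : List (List Int)) (number : Int) :
    pvTemp region number = (PySem.List.pyGet? region number).getD [] := by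
  unfold pvTemp
  rw [foldl_app_map]
  exact (List.nil_append _).trans (range_getD_map _)

theorem pvScan_eq (rest : List Int) : ∀ (lo hi : Int),
    pvScan (lo, hi) rest =
      (rest.foldl (fun a v => if v < a then v else a) lo,
       rest.foldl (fun a v => if v > a then v else a) hi) := by
  induction rest with
  | nil => intro lo hi; rfl
  | cons v t ih => intro lo hi; simpa [pvScan, List.foldl] using ih _ _

theorem foldl_if_min (t : List Int) : ∀ (a : Int),
    t.foldl (fun a v => if v < a then v else a) a = t.foldl min a := by
  induction t with
  | nil => intro a; rfl
  | cons v t ih =>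
      intro a
      have : (if v < a then v else a) = min a v := by
        rw [min_def]; split_ifs <;> omega
      simp [List.foldl, this, ih]

theorem foldl_if_max (t : List Int) : ∀ (a : Int),
    t.foldl (fun a v => if v > a then v else a) a = t.foldl max a := by
  induction t with
  | nil => intro a; rfl
  | cons v t ih =>
      intro a
      have : (if v > a then v else a) = max a v := by
        rw [max_def]; split_ifs <;> omega
      simp [List.foldl, this, ih]

-- per-region agreement, given the region's value list is nonempty
theorem region_eq (region : List (List Int)) (number : Int)
    (h : (PySem.List.pyGet? region number).getD [] ≠ []) :
    (PySem.List.max? (pvTemp region number) (fun x => x)).getD 0 -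
      (PySem.List.min? (pvTemp region number) (fun x => x)).getD 0 =
    (match (PySem.List.pyGet? region number).getD [] with
     | [] => 0
     | v :: rest => let p := pvScan (v, v) rest; p.2 - p.1) := by
  rw [pvTemp_eq]
  rcases hv : (PySem.List.pyGet? region number).getD [] with _ | ⟨v, rest⟩
  · exact absurd hv h
  · simp only [PySem.List.max?_id_cons, PySem.List.min?_id_cons, Option.getD_some,
      pvScan_eq, foldl_if_min, foldl_if_max]

theorem minimum_eq (alist : List (List (List Int))) (number : Int) :
    pvMinimum alist number =
      alist.map (fun region => (PySem.List.min? (pvTemp region number) (fun x => x)).getD 0) := by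
  unfold pvMinimum; rw [foldl_app_map]; simp

theorem maximum_eq (alist : List (List (List Int))) (number : Int) :
    pvMaximum alist number =
      alist.map (fun region => (PySem.List.max? (pvTemp region number) (fun x => x)).getD 0) := by
  unfold pvMaximum; rw [foldl_app_map]; simp

theorem sub_loop_eq (mx mn : List Int) (h : mn.length = mx.length) :
    (List.range mx.length).foldl (fun results i => results ++ [mx.getD i 0 - mn.getD i 0]) [] =
      List.zipWith (fun a b => a - b) mx mn := by
  rw [foldl_app_map]
  apply List.ext_getElem
  · simp [h]
  · intro i h1 h2
    simp at h1 ⊢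
    rw [List.getElem?_eq_getElem (by omega), List.getElem?_eq_getElem (by omega)]
    simp

-- ===== VERDICT (by name: the statement is the Claim_ definition above) =====
theorem rangeRegion_spec : Claim_equal_rangeRegion := by
  intro alist number _ hpre
  unfold Spec_rangeRegion
  show rangeRegion alist number = rangeRegion_alt alist number
  unfold rangeRegion rangeRegion_alt
  rw [maximum_eq, minimum_eq]
  rw [sub_loop_eq _ _ (by simp), List.zipWith_map, List.zipWith_self]
  apply List.map_congr_left
  intro region hmem
  exact region_eq region number (hpre region hmem).2
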